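-- pv_equiv track=rewrite | github.com/metfar/walsoc | walsoc/pa/math_h.py | ticktock
-- ===== SOURCE A (Python) =====
-- def ticktock(string,tick="√",tock="_",start="<",mid=".",end=">"):
-- 	out="";
-- 	s=str(string);
-- 	i=0;
-- 	for f in s:
-- 		if(i%4==0):
-- 			out+=mid;
-- 		if(f=="0"):
-- 			out+=tock;
-- 		if(f=="1"):
-- 			out+=tick;
-- 		i+=1;
-- 	out+=end;
-- 	out=start+out;
-- 	return(out);
-- ===== SOURCE B (Python) =====
-- def ticktock(string, tick="√", tock="_", start="<", mid=".", end=">"):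
--     s = str(string)
--     blocks = []
--     for b in range(0, len(s), 4):
--         blocks.append(mid + "".join(
--             tock if ch == "0" else tick if ch == "1" else ""
--             for ch in s[b:b+4]))
--     return start + "".join(blocks) + end
-- ===== Notes on version B (the rewrite author's own statement) =====
-- stated objective: alternative
-- what changed: Replaced A's flat per-character scan with an i % 4 counter deciding where separators go by a block-wise traversal: range(0, len(s), 4) slices the string into 4-char blocks, each block contributes mid plus its translated characters, and the blocks are joined and wrapped with start/end.
import Mathlib
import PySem

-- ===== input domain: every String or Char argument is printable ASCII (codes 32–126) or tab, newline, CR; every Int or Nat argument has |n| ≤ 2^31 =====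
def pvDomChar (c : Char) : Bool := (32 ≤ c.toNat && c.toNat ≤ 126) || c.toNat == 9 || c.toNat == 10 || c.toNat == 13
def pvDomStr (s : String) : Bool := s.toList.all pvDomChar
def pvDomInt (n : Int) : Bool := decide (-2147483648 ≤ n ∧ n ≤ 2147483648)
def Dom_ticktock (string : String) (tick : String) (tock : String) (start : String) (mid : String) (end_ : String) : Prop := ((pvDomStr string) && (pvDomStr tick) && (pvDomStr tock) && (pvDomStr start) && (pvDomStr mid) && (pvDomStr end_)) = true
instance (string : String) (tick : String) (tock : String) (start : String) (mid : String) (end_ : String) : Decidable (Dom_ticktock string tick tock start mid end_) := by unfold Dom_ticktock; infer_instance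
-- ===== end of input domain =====

-- B re-implements A block-wise (slices of 4 chars via range(0, len, 4)) instead of A's
-- flat per-character scan with an i % 4 counter; objective: alternative decomposition, same cost.

-- ===== PORT A =====
def ticktock (string : String) (tick : String) (tock : String) (start : String) (mid : String) (end_ : String) : String :=
  let out : String := ""
  let s := string
  let res := s.toList.foldl (fun (st : String × Int) f =>
    let out := st.1
    let out := if PySem.Int.mod st.2 4 = 0 then out ++ mid else out
    let out := if f = '0' then out ++ tock else out
    let out := if f = '1' then out ++ tick else out
    (out, st.2 + 1)) (out, (0 : Int))
  let out := res.1 ++ end_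
  let out := start ++ out
  out

-- ===== PORT B =====
def ticktock_alt (string : String) (tick : String) (tock : String) (start : String) (mid : String) (end_ : String) : String :=
  let s := string
  let blocks := (PySem.List.pyRange 0 (PySem.Str.len s) 4).foldl
    (fun acc b => acc ++ [mid ++ String.join ((PySem.Str.slice s (some b) (some (b + 4))).toList.map
      (fun ch => if ch = '0' then tock else if ch = '1' then tick else ""))]) ([] : List String)
  start ++ String.join blocks ++ end_

-- ===== PRECONDITION & SPEC =====
def Spec_ticktock (string : String) (tick : String) (tock : String) (start : String) (mid : String) (end_ : String) (out : String) : Prop := out = ticktock_alt string tick tock start mid end_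
instance (string : String) (tick : String) (tock : String) (start : String) (mid : String) (end_ : String) (out : String) : Decidable (Spec_ticktock string tick tock start mid end_ out) := by unfold Spec_ticktock; infer_instance

-- ===== CLAIM (what is proved, stated in full; the proofs are below) =====
def Claim_equal_ticktock : Prop := ∀ (string : String) (tick : String) (tock : String) (start : String) (mid : String) (end_ : String), Dom_ticktock string tick tock start mid end_ → Spec_ticktock string tick tock start mid end_ (ticktock string tick tock start mid end_)

-- ===== LEMMAS AND PROOFS =====

/-- The symbol one character contributes (both programs agree on it pointwise). -/
def pvTr (tick tock : String) (ch : Char) : String :=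
  if ch = '0' then tock else if ch = '1' then tick else ""

/-- Common normal form: the encoded body, one 4-char block at a time. -/
def pvBlocks (tick tock mid : String) (l : List Char) : String :=
  if l = [] then ""
  else mid ++ String.join ((l.take 4).map (pvTr tick tock)) ++ pvBlocks tick tock mid (l.drop 4)
termination_by l.length
decreasing_by cases l with
  | nil => simp_all
  | cons a t => simp

/-- A's flat scan, abstracted over the running counter. -/
def pvFlat (tick tock mid : String) : Int → List Char → String
  | _, [] => ""
  | i, c :: rest =>
      (if PySem.Int.mod i 4 = 0 then mid else "") ++ pvTr tick tock c ++ pvFlat tick tock mid (i + 1) rest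

theorem pvA_loop (tick tock mid : String) (l : List Char) (out : String) (i : Int) :
    (l.foldl (fun (st : String × Int) f =>
      let o := st.1
      let o := if PySem.Int.mod st.2 4 = 0 then o ++ mid else o
      let o := if f = '0' then o ++ tock else o
      let o := if f = '1' then o ++ tick else o
      (o, st.2 + 1)) (out, i)).1 = out ++ pvFlat tick tock mid i l := by
  induction l generalizing out i with
  | nil => simp [pvFlat]
  | cons c rest ih =>
      simp only [List.foldl_cons]
      rw [ih]
      simp only [pvFlat, pvTr]
      by_cases h0 : PySem.Int.mod i 4 = 0 <;> by_cases hc0 : c = '0' <;> by_cases hc1 : c = '1' <;>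
        simp_all [String.append_assoc]

theorem pvFlat_eq_pvBlocks (tick tock mid : String) (i : Int) (l : List Char) (h : (4:Int) ∣ i) :
    pvFlat tick tock mid i l = pvBlocks tick tock mid l := by
  have h0 : PySem.Int.mod i 4 = 0 := (PySem.Int.mod_eq_zero_iff_dvd _ _).mpr h
  have h1 : ¬ PySem.Int.mod (i + 1) 4 = 0 := by rw [PySem.Int.mod_eq_zero_iff_dvd]; omega
  have h2 : ¬ PySem.Int.mod (i + 1 + 1) 4 = 0 := by rw [PySem.Int.mod_eq_zero_iff_dvd]; omega
  have h3 : ¬ PySem.Int.mod (i + 1 + 1 + 1) 4 = 0 := by rw [PySem.Int.mod_eq_zero_iff_dvd]; omega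
  match l with
  | [] => rw [pvFlat, pvBlocks]; simp
  | [a] =>
      simp only [pvFlat]
      rw [if_pos h0, pvBlocks, pvBlocks]
      simp [String.join]
  | [a, b] =>
      simp only [pvFlat]
      rw [if_pos h0, if_neg h1, pvBlocks, pvBlocks]
      simp [String.join, String.append_assoc]
  | [a, b, c] =>
      simp only [pvFlat]
      rw [if_pos h0, if_neg h1, if_neg h2, pvBlocks, pvBlocks]
      simp [String.join, String.append_assoc]
  | a :: b :: c :: d :: rest =>
      have ih := pvFlat_eq_pvBlocks tick tock mid (i + 1 + 1 + 1 + 1) rest (by omega)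
      simp only [pvFlat]
      rw [if_pos h0, if_neg h1, if_neg h2, if_neg h3, ih]
      conv_rhs => rw [pvBlocks]
      simp [String.join, String.append_assoc]
termination_by l.length

theorem pv_join_append (acc : List String) (x : String) :
    String.join (acc ++ [x]) = String.join acc ++ x := by
  induction acc with
  | nil => simp [String.join]
  | cons a t ih => simp_all [String.join]

theorem pv_pyRange_four_cons (j n : Int) (h : j < n) :
    PySem.List.pyRange j n 4 = j :: PySem.List.pyRange (j + 4) n 4 := by
  rw [PySem.List.pyRange_of_pos _ _ (by norm_num), PySem.List.pyRange_of_pos _ _ (by norm_num)]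
  have hcnt : (if j < n then ((n - j + 4 - 1) / 4).toNat else 0)
      = (if j + 4 < n then ((n - (j + 4) + 4 - 1) / 4).toNat else 0) + 1 := by
    split_ifs <;> omega
  rw [hcnt, List.range_succ_eq_map, List.map_cons, List.map_map]
  refine List.cons_eq_cons.mpr ⟨by simp, ?_⟩
  apply List.map_congr_left
  intro k _
  simp [Function.comp]
  omega

theorem pvB_loop (tick tock mid : String) (s : String) (j : Nat) (acc : List String) :
    String.join ((PySem.List.pyRange (j : Int) (s.toList.length : Int) 4).foldl
      (fun acc b => acc ++ [mid ++ String.join ((PySem.Str.slice s (some b) (some (b + 4))).toList.map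
        (pvTr tick tock))]) acc)
    = String.join acc ++ pvBlocks tick tock mid (s.toList.drop j) := by
  by_cases h : (j : Int) < (s.toList.length : Int)
  · rw [pv_pyRange_four_cons _ _ h, List.foldl_cons]
    have hj4 : ((j : Int) + 4) = ((j + 4 : Nat) : Int) := by push_cast; ring
    have hrec := pvB_loop tick tock mid s (j + 4)
      (acc ++ [mid ++ String.join ((PySem.Str.slice s (some (j : Int)) (some ((j : Int) + 4))).toList.map
        (pvTr tick tock))])
    rw [hj4] at *
    rw [hrec, pv_join_append]
    have hslice : (PySem.Str.slice s (some (j : Int)) (some (((j + 4 : Nat) : Int)))).toList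
        = (s.toList.drop j).take 4 := by
      rw [PySem.Str.toList_slice, PySem.Chars.slice_eq_listSlice]
      have : ((j + 4 : Nat) : Int) = (j : Int) + ((4 : Nat) : Int) := by push_cast; ring
      rw [this, PySem.List.slice_natCast_add]
    rw [hslice]
    have hne : s.toList.drop j ≠ [] := by
      intro hnil
      have := List.drop_eq_nil_iff.mp hnil
      omega
    conv_rhs => rw [pvBlocks]
    rw [if_neg hne, List.drop_drop]
    simp [String.append_assoc]
  · have hempty : PySem.List.pyRange (j : Int) (s.toList.length : Int) 4 = [] := by
      rw [PySem.List.pyRange_of_pos _ _ (by norm_num)]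
      rw [if_neg (by omega)]
      simp
    have hdrop : s.toList.drop j = [] := List.drop_eq_nil_of_le (by omega)
    rw [hempty, hdrop]
    simp [pvBlocks]
termination_by s.toList.length - j
decreasing_by omega

-- ===== VERDICT (by name: the statement is the Claim_ definition above) =====
theorem ticktock_spec : Claim_equal_ticktock := by
  intro string tick tock start mid end_ _
  unfold Spec_ticktock ticktock ticktock_alt
  simp only []
  rw [pvA_loop tick tock mid string.toList "" 0]
  have hlam : (fun ch => if ch = '0' then tock else if ch = '1' then tick else "")
      = pvTr tick tock := rfl
  rw [hlam]
  have hlen : PySem.Str.len string = ((string.toList.length : Nat) : Int) := by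
    simp [pysem]
  rw [hlen]
  have hB := pvB_loop tick tock mid string 0 ([] : List String)
  simp only [Nat.cast_zero] at hB
  rw [hB]
  rw [pvFlat_eq_pvBlocks tick tock mid 0 string.toList ⟨0, by ring⟩]
  simp [String.join, String.append_assoc]
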